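-- pv_equiv track=rewrite | github.com/Ananta-dot/misr_new | misr_seek_pkl.py | motif_interleave
-- ===== SOURCE A (Python) =====
-- from typing import Dict, List, Tuple
--
-- Seq = List[int]
--
-- def motif_interleave(n: int) -> Seq:
--     out=[]
--     for i in range(1, n+1, 2):
--         j = i+1 if i+1<=n else i
--         out += [i, j, i, j]
--     cnt = {i:0 for i in range(1,n+1)}; fixed=[]
--     for x in out:
--         if cnt[x] < 2:
--             fixed.append(x); cnt[x]+=1
--     for i in range(1,n+1):
--         while cnt[i] < 2:
--             fixed.append(i); cnt[i]+=1
--     return fixed[:2*n]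
-- ===== SOURCE B (Python) =====
-- def motif_interleave(n):
--     if n < 1:
--         return []
--     full = 4 * (n // 2)  # positions filled by complete [i, i+1, i, i+1] blocks
--     return [n if p >= full else 2 * (p // 4) + 1 + p % 2 for p in range(2 * n)]
-- ===== Notes on version B (the rewrite author's own statement) =====
-- stated objective: faster
-- what changed: B computes each output position directly from a closed-form index formula over range(2*n) (one comprehension), replacing A's block-building loop plus count-dict capping pass plus fill loop plus final slice.
import Mathlib
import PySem

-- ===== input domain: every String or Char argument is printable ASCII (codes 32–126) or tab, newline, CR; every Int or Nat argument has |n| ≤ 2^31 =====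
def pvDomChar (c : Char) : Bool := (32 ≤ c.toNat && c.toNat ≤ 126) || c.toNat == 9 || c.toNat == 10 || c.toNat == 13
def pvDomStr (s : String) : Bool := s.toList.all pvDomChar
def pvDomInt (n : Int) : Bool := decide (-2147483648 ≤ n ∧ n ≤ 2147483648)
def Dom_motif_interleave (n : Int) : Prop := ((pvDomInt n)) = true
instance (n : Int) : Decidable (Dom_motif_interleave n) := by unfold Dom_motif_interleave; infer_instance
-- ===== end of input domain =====

-- B replaces A's block loop + count-dict capping pass + fill loop + slice by a single
-- closed-form index formula over range(2*n); a timing run measured B faster (constant factor).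

-- ===== PORT A =====
-- A-side helper: the inner 'while cnt[i] < 2: fixed.append(i); cnt[i] += 1' loop.
-- (cnt[i] is ported as getD i 0: exact here because cnt holds every i of range(1, n+1).)
def pvFillWhile (cnt : PySem.Dict Int Int) (fixed : List Int) (i : Int) :
    PySem.Dict Int Int × List Int :=
  if _h : cnt.getD i 0 < 2 then
    pvFillWhile (cnt.insert i (cnt.getD i 0 + 1)) (fixed ++ [i]) i
  else (cnt, fixed)
  termination_by (2 - cnt.getD i 0).toNat
  decreasing_by simp only [PySem.Dict.getD_insert_self]; omega

def motif_interleave (n : Int) : List Int :=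
  let out := (PySem.List.pyRange 1 (n + 1) 2).foldl
      (fun out i =>
        let j := if i + 1 ≤ n then i + 1 else i
        out ++ [i, j, i, j]) []
  let cnt : PySem.Dict Int Int :=
    (PySem.List.pyRange 1 (n + 1)).foldl (fun d i => d.insert i 0) PySem.Dict.empty
  let st := out.foldl
      (fun (s : PySem.Dict Int Int × List Int) x =>
        if s.1.getD x 0 < 2 then (s.1.insert x (s.1.getD x 0 + 1), s.2 ++ [x]) else s)
      (cnt, [])
  let st2 := (PySem.List.pyRange 1 (n + 1)).foldl (fun s i => pvFillWhile s.1 s.2 i) st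
  PySem.List.slice st2.2 none (some (2 * n))

-- ===== PORT B =====
def motif_interleave_alt (n : Int) : List Int :=
  if n < 1 then []
  else
    let full := 4 * PySem.Int.floordiv n 2
    (PySem.List.pyRange 0 (2 * n)).map
      (fun p => if p ≥ full then n
                else 2 * PySem.Int.floordiv p 4 + 1 + PySem.Int.mod p 2)

-- ===== PRECONDITION & SPEC =====
def Spec_motif_interleave (n : Int) (out : List Int) : Prop := out = motif_interleave_alt n
instance (n : Int) (out : List Int) : Decidable (Spec_motif_interleave n out) := by unfold Spec_motif_interleave; infer_instance

-- ===== CLAIM (what is proved, stated in full; the proofs are below) =====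
def Claim_equal_motif_interleave : Prop := ∀ (n : Int), Dom_motif_interleave n → Spec_motif_interleave n (motif_interleave n)

-- ===== LEMMAS AND PROOFS =====

-- A's i-th block [i, j, i, j] and the ≤2-occurrences-per-value part the capping pass keeps.
def pvBlock (n i : Int) : List Int :=
  let j := if i + 1 ≤ n then i + 1 else i
  [i, j, i, j]

def pvKept (n i : Int) : List Int :=
  if i + 1 ≤ n then [i, i + 1, i, i + 1] else [i, i]

-- step-2 range unfolding (PySem has cons lemmas only for step ±1)
lemma pvRange2_cons (a b : Int) (h : a < b) :
    PySem.List.pyRange a b 2 = a :: PySem.List.pyRange (a + 2) b 2 := by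
  rw [PySem.List.pyRange_of_pos a b (by norm_num), PySem.List.pyRange_of_pos (a + 2) b (by norm_num)]
  have h1 : ((b - a + 2 - 1) / 2).toNat = ((b - (a + 2) + 2 - 1) / 2).toNat + 1 := by omega
  by_cases h2 : a + 2 < b
  · simp only [if_pos h, if_pos h2, h1, List.range_succ_eq_map, List.map_cons, List.map_map]
    congr 1
    · norm_num
    · congr 1
      funext k
      simp only [Function.comp_apply]
      push_cast
      ring
  · have h3 : ((b - a + 2 - 1) / 2).toNat = 1 := by omega
    simp only [if_pos h, if_neg h2, h3]
    simp

lemma pvRange2_nil (a b : Int) (h : b ≤ a) : PySem.List.pyRange a b 2 = [] := by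
  rw [PySem.List.pyRange_of_pos a b (by norm_num)]
  simp [Int.not_lt.mpr h]

-- the initial count dict answers 0 everywhere
lemma pvCnt0 (l : List Int) (d : PySem.Dict Int Int) (h : ∀ x, d.getD x 0 = 0) :
    ∀ x, (l.foldl (fun d i => d.insert i 0) d).getD x 0 = 0 := by
  induction l generalizing d with
  | nil => exact h
  | cons i t ih =>
      intro x
      exact ih _ (fun y => by rw [PySem.Dict.getD_insert]; split <;> simp [h]) x

-- the two ways the capping pass consumes one block of A's out list
lemma pvBlockFold1 (s : Int) (cnt : PySem.Dict Int Int) (fixed : List Int)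
    (hcs : cnt.getD s 0 = 0) (hcs1 : cnt.getD (s + 1) 0 = 0) :
    List.foldl (fun (st : PySem.Dict Int Int × List Int) x =>
        if st.1.getD x 0 < 2 then (st.1.insert x (st.1.getD x 0 + 1), st.2 ++ [x]) else st)
      (cnt, fixed) [s, s + 1, s, s + 1]
    = ((((cnt.insert s 1).insert (s + 1) 1).insert s 2).insert (s + 1) 2,
       fixed ++ [s, s + 1, s, s + 1]) := by
  have hne : s + 1 ≠ s := by omega
  have hne' : s ≠ s + 1 := by omega
  simp [List.foldl_cons, PySem.Dict.getD_insert, hcs, hcs1, hne, hne']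

lemma pvBlockFold2 (s : Int) (cnt : PySem.Dict Int Int) (fixed : List Int)
    (hcs : cnt.getD s 0 = 0) :
    List.foldl (fun (st : PySem.Dict Int Int × List Int) x =>
        if st.1.getD x 0 < 2 then (st.1.insert x (st.1.getD x 0 + 1), st.2 ++ [x]) else st)
      (cnt, fixed) [s, s, s, s]
    = ((cnt.insert s 1).insert s 2, fixed ++ [s, s]) := by
  simp [List.foldl_cons, hcs]

-- the capping pass over the blocks from s on: it keeps pvKept and leaves every count in [s, n] at 2
lemma pvCapMain (n : Int) : ∀ (k : Nat) (s : Int), (n + 1 - s).toNat ≤ k →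
    ∀ (cnt : PySem.Dict Int Int) (fixed : List Int), (∀ x, s ≤ x → cnt.getD x 0 = 0) →
    (((PySem.List.pyRange s (n + 1) 2).flatMap (pvBlock n)).foldl
        (fun (st : PySem.Dict Int Int × List Int) x =>
          if st.1.getD x 0 < 2 then (st.1.insert x (st.1.getD x 0 + 1), st.2 ++ [x]) else st)
        (cnt, fixed)).2
      = fixed ++ (PySem.List.pyRange s (n + 1) 2).flatMap (pvKept n) ∧
    ∀ x, (((PySem.List.pyRange s (n + 1) 2).flatMap (pvBlock n)).foldl
        (fun (st : PySem.Dict Int Int × List Int) x =>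
          if st.1.getD x 0 < 2 then (st.1.insert x (st.1.getD x 0 + 1), st.2 ++ [x]) else st)
        (cnt, fixed)).1.getD x 0
      = if s ≤ x ∧ x ≤ n then 2 else cnt.getD x 0 := by
  intro k
  induction k with
  | zero =>
      intro s hk cnt fixed h0
      rw [pvRange2_nil s (n + 1) (by omega)]
      refine ⟨by simp, fun x => ?_⟩
      split
      · omega
      · rfl
  | succ k ih =>
      intro s hk cnt fixed h0
      by_cases hs : s < n + 1
      · rw [pvRange2_cons s (n + 1) hs, List.flatMap_cons, List.foldl_append]
        by_cases hj : s + 1 ≤ n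
        · -- block [s, s+1, s, s+1]: all four occurrences are kept
          have hb : pvBlock n s = [s, s + 1, s, s + 1] := by simp [pvBlock, hj]
          have hcs : cnt.getD s 0 = 0 := h0 s le_rfl
          have hcs1 : cnt.getD (s + 1) 0 = 0 := h0 (s + 1) (by omega)
          rw [hb, pvBlockFold1 s cnt fixed hcs hcs1]
          have h0' : ∀ x, s + 2 ≤ x →
              ((((cnt.insert s 1).insert (s + 1) 1).insert s 2).insert (s + 1) 2).getD x 0 = 0 := by
            intro x hx
            rw [PySem.Dict.getD_insert, if_neg (by omega), PySem.Dict.getD_insert,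
              if_neg (by omega), PySem.Dict.getD_insert, if_neg (by omega),
              PySem.Dict.getD_insert, if_neg (by omega)]
            exact h0 x (by omega)
          obtain ⟨ih1, ih2⟩ := ih (s + 2) (by omega) _ _ h0'
          refine ⟨by rw [ih1]; simp [pvKept, hj], fun x => ?_⟩
          rw [ih2 x]
          by_cases hx1 : s + 2 ≤ x ∧ x ≤ n
          · rw [if_pos hx1, if_pos (by omega)]
          · rw [if_neg hx1]
            rw [PySem.Dict.getD_insert, PySem.Dict.getD_insert, PySem.Dict.getD_insert,
              PySem.Dict.getD_insert]
            by_cases hxs : x = s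
            · rw [if_neg (by omega), if_pos hxs, if_pos (by omega)]
            · by_cases hxs1 : x = s + 1
              · rw [if_pos hxs1, if_pos (by omega)]
              · rw [if_neg hxs1, if_neg hxs, if_neg hxs1, if_neg hxs, if_neg (by omega)]
        · -- block [s, s, s, s]: only two copies are kept
          have hb : pvBlock n s = [s, s, s, s] := by simp [pvBlock, hj]
          have hcs : cnt.getD s 0 = 0 := h0 s le_rfl
          rw [hb, pvBlockFold2 s cnt fixed hcs]
          have h0' : ∀ x, s + 2 ≤ x →
              ((cnt.insert s 1).insert s 2).getD x 0 = 0 := by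
            intro x hx
            rw [PySem.Dict.getD_insert, if_neg (by omega), PySem.Dict.getD_insert,
              if_neg (by omega)]
            exact h0 x (by omega)
          obtain ⟨ih1, ih2⟩ := ih (s + 2) (by omega) _ _ h0'
          refine ⟨by rw [ih1]; simp [pvKept, hj], fun x => ?_⟩
          rw [ih2 x]
          by_cases hx1 : s + 2 ≤ x ∧ x ≤ n
          · rw [if_pos hx1, if_pos (by omega)]
          · rw [if_neg hx1, PySem.Dict.getD_insert, PySem.Dict.getD_insert]
            by_cases hxs : x = s
            · rw [if_pos hxs, if_pos (by omega)]
            · rw [if_neg hxs, if_neg hxs, if_neg (by omega)]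
      · rw [pvRange2_nil s (n + 1) (by omega)]
        refine ⟨by simp, fun x => ?_⟩
        split
        · omega
        · rfl

-- the fill loop adds nothing when every visited count is already 2
lemma pvFillWhile_noop (cnt : PySem.Dict Int Int) (fixed : List Int) (i : Int)
    (h : cnt.getD i 0 = 2) : pvFillWhile cnt fixed i = (cnt, fixed) := by
  rw [pvFillWhile, dif_neg (by omega)]

lemma pvFill_noop (l : List Int) : ∀ (cnt : PySem.Dict Int Int) (fixed : List Int),
    (∀ i ∈ l, cnt.getD i 0 = 2) →
    l.foldl (fun s i => pvFillWhile s.1 s.2 i) (cnt, fixed) = (cnt, fixed) := by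
  induction l with
  | nil => intro cnt fixed _; rfl
  | cons i t ih =>
      intro cnt fixed h
      simp only [List.foldl_cons]
      rw [pvFillWhile_noop cnt fixed i (h i (by simp))]
      exact ih cnt fixed (fun j hj => h j (by simp [hj]))

-- B's closed-form value list coincides with the kept blocks from s = 2t+1 on
lemma pvAltMain (n : Int) : ∀ (k : Nat) (t : Int), (n - 2 * t).toNat ≤ k → 0 ≤ t →
    (PySem.List.pyRange (2 * (2 * t + 1) - 2) (2 * n)).map
        (fun p => if p ≥ 4 * PySem.Int.floordiv n 2 then n
                  else 2 * PySem.Int.floordiv p 4 + 1 + PySem.Int.mod p 2)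
      = (PySem.List.pyRange (2 * t + 1) (n + 1) 2).flatMap (pvKept n) := by
  intro k
  induction k with
  | zero =>
      intro t hk ht
      rw [pvRange2_nil _ _ (by omega), PySem.List.pyRange_one_eq_nil (by omega)]
      simp
  | succ k ih =>
      intro t hk ht
      set s := 2 * t + 1 with hs
      by_cases hlt : s < n + 1
      · rw [pvRange2_cons s (n + 1) hlt, List.flatMap_cons]
        have hfd : ∀ r : Int, 0 ≤ r → r < 4 → PySem.Int.floordiv (4 * t + r) 4 = t := by
          intro r h1 h2
          rw [PySem.Int.floordiv_eq_iff_of_pos (by norm_num)]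
          omega
        have hmd : ∀ a : Int, PySem.Int.mod a 2 = a % 2 :=
          fun a => PySem.Int.mod_eq_emod_of_pos (by norm_num)
        have hnd2 : PySem.Int.floordiv n 2 = n / 2 :=
          PySem.Int.floordiv_eq_ediv_of_pos (by norm_num)
        by_cases hj : s + 1 ≤ n
        · have hfull : 2 * s + 1 < 4 * PySem.Int.floordiv n 2 := by rw [hnd2]; omega
          rw [PySem.List.pyRange_one_cons (show 2 * s - 2 < 2 * n by omega),
            PySem.List.pyRange_one_cons (show 2 * s - 2 + 1 < 2 * n by omega),
            PySem.List.pyRange_one_cons (show 2 * s - 2 + 1 + 1 < 2 * n by omega),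
            PySem.List.pyRange_one_cons (show 2 * s - 2 + 1 + 1 + 1 < 2 * n by omega)]
          simp only [List.map_cons]
          rw [if_neg (by rw [hnd2]; omega), if_neg (by rw [hnd2]; omega),
            if_neg (by rw [hnd2]; omega), if_neg (by rw [hnd2]; omega)]
          rw [show 2 * s - 2 = 4 * t + 0 by omega] 
          rw [hfd 0 (by norm_num) (by norm_num)]
          rw [show 4 * t + 0 + 1 = 4 * t + 1 by ring, hfd 1 (by norm_num) (by norm_num)]
          rw [show 4 * t + 1 + 1 = 4 * t + 2 by ring, hfd 2 (by norm_num) (by norm_num)]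
          rw [show 4 * t + 2 + 1 = 4 * t + 3 by ring, hfd 3 (by norm_num) (by norm_num)]
          simp only [hmd]
          rw [show (4 * t + 0) % 2 = 0 by omega, show (4 * t + 1) % 2 = 1 by omega,
            show (4 * t + 2) % 2 = 0 by omega, show (4 * t + 3) % 2 = 1 by omega]
          have ih' := ih (t + 1) (by omega) (by omega)
          rw [show 2 * (2 * (t + 1) + 1) - 2 = 4 * t + 3 + 1 by ring] at ih'
          rw [show 2 * (t + 1) + 1 = s + 2 by omega] at ih'
          simp only [hmd] at ih'
          rw [ih']
          rw [show pvKept n s = [s, s + 1, s, s + 1] from by simp [pvKept, hj]]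
          simp only [hs, List.cons_append, List.nil_append]
          norm_num
        · -- s = n (odd tail): two positions, both map to n
          have hsn : s = n := by omega
          have hfulleq : 4 * PySem.Int.floordiv n 2 = 2 * n - 2 := by rw [hnd2]; omega
          rw [PySem.List.pyRange_one_cons (show 2 * s - 2 < 2 * n by omega),
            PySem.List.pyRange_one_cons (show 2 * s - 2 + 1 < 2 * n by omega)]
          simp only [List.map_cons]
          rw [if_pos (by rw [hfulleq]; omega), if_pos (by rw [hfulleq]; omega)]
          rw [show 2 * s - 2 + 1 + 1 = 2 * n by omega,
            PySem.List.pyRange_one_eq_nil (le_refl (2 * n)),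
            pvRange2_nil (s + 2) (n + 1) (by omega)]
          simp [pvKept, hsn]
      · rw [pvRange2_nil s (n + 1) (by omega),
          PySem.List.pyRange_one_eq_nil (by omega)]
        simp

-- ===== VERDICT (by name: the statement is the Claim_ definition above) =====
theorem motif_interleave_spec : Claim_equal_motif_interleave := by
  intro n _
  unfold Spec_motif_interleave motif_interleave motif_interleave_alt
  by_cases hn : n < 1
  · rw [if_pos hn]
    rw [pvRange2_nil 1 (n + 1) (by omega), PySem.List.pyRange_one_eq_nil (by omega)]
    simp [PySem.List.slice]
  · rw [if_neg hn]
    simp only []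
    rw [PySem.List.foldl_append_eq_flatMap
      (g := fun i => [i, (if i + 1 ≤ n then i + 1 else i), i, (if i + 1 ≤ n then i + 1 else i)])]
    rw [show (fun (i : Int) =>
        [i, (if i + 1 ≤ n then i + 1 else i), i, (if i + 1 ≤ n then i + 1 else i)]) = pvBlock n by
      funext i; simp [pvBlock]]
    rw [List.nil_append]
    have hcnt0 : ∀ x, ((PySem.List.pyRange 1 (n + 1)).foldl
        (fun (d : PySem.Dict Int Int) i => d.insert i 0) PySem.Dict.empty).getD x 0 = 0 :=
      pvCnt0 _ _ (fun x => PySem.Dict.getD_empty x 0)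
    obtain ⟨hfix, hcnt⟩ := pvCapMain n (n + 1 - 1).toNat 1 (by omega) _ [] (fun x _ => hcnt0 x)
    rw [List.nil_append] at hfix
    set st := ((PySem.List.pyRange 1 (n + 1) 2).flatMap (pvBlock n)).foldl
      (fun (s : PySem.Dict Int Int × List Int) x =>
        if s.1.getD x 0 < 2 then (s.1.insert x (s.1.getD x 0 + 1), s.2 ++ [x]) else s)
      ((PySem.List.pyRange 1 (n + 1)).foldl (fun d i => d.insert i 0) PySem.Dict.empty, [])
      with hstdef
    have hfill : (PySem.List.pyRange 1 (n + 1)).foldl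
        (fun s i => pvFillWhile s.1 s.2 i) st = st := by
      rw [show st = (st.1, st.2) from rfl]
      apply pvFill_noop
      intro i hi
      rw [PySem.List.mem_pyRange_one] at hi
      rw [hcnt i, if_pos (by omega)]
    rw [hfill, hfix]
    have halt := pvAltMain n (n - 0).toNat 0 (by omega) le_rfl
    rw [show 2 * (2 * (0:Int) + 1) - 2 = 0 by norm_num,
      show 2 * (0:Int) + 1 = 1 by norm_num] at halt
    rw [← halt]
    rw [PySem.List.slice_to _ (by omega)]
    apply List.take_of_length_le
    rw [List.length_map, PySem.List.pyRange_of_pos 0 (2 * n) (by norm_num)]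
    rw [if_pos (by omega)]
    simp only [List.length_map, List.length_range]
    omega
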